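-- pv_equiv track=rewrite | github.com/dexkum-2myzZy-jipzid/leetcode | LeetCode/3532.Path_Existence_Queries_in_a_Graph_I/Mario/3532.Path_Existence_Queries_in_a_Graph_I.py | pathExistenceQueries
-- ===== SOURCE A (Python) =====
-- from typing import List
--
-- def pathExistenceQueries(
--     n: int, nums: List[int], maxDiff: int, queries: List[List[int]]
-- ) -> List[bool]:
--     group = [0] * n
--     cur_group = 0
--
--     for i in range(n - 1):
--         if nums[i + 1] - nums[i] > maxDiff:
--             cur_group += 1
--         group[i + 1] = cur_group
--
--     res = []
--     for q in queries:
--         u, v = q[0], q[1]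
--         res.append(group[u] == group[v])
--
--     return res
-- ===== SOURCE B (Python) =====
-- from typing import List
--
-- def pathExistenceQueries(
--     n: int, nums: List[int], maxDiff: int, queries: List[List[int]]
-- ) -> List[bool]:
--     # Union-find (disjoint-set forest) over the n nodes instead of a group-id table.
--     parent = list(range(n))
--
--     def find(x):
--         while parent[x] != x:
--             x = parent[x]
--         return x
--
--     for i in range(n - 1):
--         if nums[i + 1] - nums[i] <= maxDiff:
--             parent[find(i + 1)] = find(i)
--
--     return [find(q[0]) == find(q[1]) for q in queries]
-- ===== Notes on version B (the rewrite author's own statement) =====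
-- stated objective: alternative
-- what changed: A builds a length-n array of group ids with a running counter and compares ids; B maintains a union-find parent forest (parent[i]=i, union adjacent indices when the gap is <= maxDiff, iterative find to the root) and answers each query by comparing roots.
import Mathlib
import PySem

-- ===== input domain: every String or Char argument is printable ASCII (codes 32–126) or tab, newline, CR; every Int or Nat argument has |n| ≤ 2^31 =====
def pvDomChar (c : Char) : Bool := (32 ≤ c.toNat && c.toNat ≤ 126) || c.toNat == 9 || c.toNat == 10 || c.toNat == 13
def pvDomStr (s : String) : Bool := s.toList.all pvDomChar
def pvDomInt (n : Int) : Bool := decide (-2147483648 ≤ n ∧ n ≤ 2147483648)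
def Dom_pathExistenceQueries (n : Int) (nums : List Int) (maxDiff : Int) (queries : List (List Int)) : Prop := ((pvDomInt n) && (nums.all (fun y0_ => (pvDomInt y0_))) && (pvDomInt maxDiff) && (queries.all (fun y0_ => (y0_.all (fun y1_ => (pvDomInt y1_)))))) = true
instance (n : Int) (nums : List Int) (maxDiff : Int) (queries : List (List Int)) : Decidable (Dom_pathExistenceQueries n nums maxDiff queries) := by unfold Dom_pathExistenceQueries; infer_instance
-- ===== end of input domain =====

-- B replaces A's running-counter group-id array by a union-find parent forest: union adjacent
-- indices when the gap is ≤ maxDiff, answer queries by comparing roots (objective: alternative).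

-- ===== PORT A =====
-- one step of 'for i in range(n - 1): if nums[i+1] - nums[i] > maxDiff: cur += 1; group[i+1] = cur'
-- (nums[...] via pyGetD: Pre_ keeps the indices in range, so the default is never read)
def pvStepA (nums : List Int) (maxDiff : Int) (st : List Int × Int) (i : Int) : List Int × Int :=
  let cur := if PySem.List.pyGetD nums (i + 1) 0 - PySem.List.pyGetD nums i 0 > maxDiff
             then st.2 + 1 else st.2
  (PySem.List.pySetD st.1 (i + 1) cur, cur)

def pathExistenceQueries (n : Int) (nums : List Int) (maxDiff : Int) (queries : List (List Int)) : List Bool :=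
  -- group = [0] * n  ([0]*n is empty for n ≤ 0, hence n.toNat)
  let st := (PySem.List.pyRange 0 (n - 1) 1).foldl (pvStepA nums maxDiff) (List.replicate n.toNat 0, 0)
  queries.foldl
    (fun res q =>
      let u := PySem.List.pyGetD q 0 0   -- q[0], q[1]: in range under Pre_
      let v := PySem.List.pyGetD q 1 0
      res ++ [decide (PySem.List.pyGetD st.1 u 0 = PySem.List.pyGetD st.1 v 0)])
    []

-- ===== PORT B =====
-- 'while parent[x] != x: x = parent[x]; return x', as fuel recursion; the fuel (len+1, see the
-- call sites) is a totality guard only — in the parent forests B builds the chain to the root has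
-- length ≤ 2, so the fuel is never exhausted.
def pvFind (fuel : Nat) (p : List Int) (x : Int) : Int :=
  match fuel with
  | 0 => x
  | f + 1 =>
    let px := PySem.List.pyGetD p x 0
    if px = x then x else pvFind f p px

-- one step of 'for i in range(n - 1): if nums[i+1] - nums[i] <= maxDiff: parent[find(i+1)] = find(i)'
def pvStepB (nums : List Int) (maxDiff : Int) (p : List Int) (i : Int) : List Int :=
  if PySem.List.pyGetD nums (i + 1) 0 - PySem.List.pyGetD nums i 0 ≤ maxDiff then
    PySem.List.pySetD p (pvFind (p.length + 1) p (i + 1)) (pvFind (p.length + 1) p i)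
  else p

def pathExistenceQueries_alt (n : Int) (nums : List Int) (maxDiff : Int) (queries : List (List Int)) : List Bool :=
  -- parent = list(range(n))
  let p := (PySem.List.pyRange 0 (n - 1) 1).foldl (pvStepB nums maxDiff) (PySem.List.pyRange 0 n 1)
  queries.map (fun q =>
    decide (pvFind (p.length + 1) p (PySem.List.pyGetD q 0 0)
          = pvFind (p.length + 1) p (PySem.List.pyGetD q 1 0)))

-- ===== PRECONDITION & SPEC =====
-- Pre_ is exactly the inputs on which the Python A returns: nums long enough for the adjacency scan
-- (else nums[i+1] raises IndexError), each query of length ≥ 2 (else q[1] raises) with both endpoints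
-- in [-n, n) (else group[u] raises IndexError; negative endpoints index from the end, Python-style,
-- and are admitted).
def Pre_pathExistenceQueries (n : Int) (nums : List Int) (maxDiff : Int) (queries : List (List Int)) : Prop :=
  (n ≤ 1 ∨ n ≤ (nums.length : Int)) ∧
  ∀ q ∈ queries, 2 ≤ q.length ∧
    -n ≤ q.getD 0 0 ∧ q.getD 0 0 < n ∧ -n ≤ q.getD 1 0 ∧ q.getD 1 0 < n
instance (n : Int) (nums : List Int) (maxDiff : Int) (queries : List (List Int)) : Decidable (Pre_pathExistenceQueries n nums maxDiff queries) := by unfold Pre_pathExistenceQueries; infer_instance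

def pvWitness_pathExistenceQueries : Int × List Int × Int × List (List Int) :=
  (4, [1, 3, 10, 11], 2, [[0, 1], [1, 2], [0, 3], [-1, 2]])

def Spec_pathExistenceQueries (n : Int) (nums : List Int) (maxDiff : Int) (queries : List (List Int)) (out : List Bool) : Prop := out = pathExistenceQueries_alt n nums maxDiff queries
instance (n : Int) (nums : List Int) (maxDiff : Int) (queries : List (List Int)) (out : List Bool) : Decidable (Spec_pathExistenceQueries n nums maxDiff queries out) := by unfold Spec_pathExistenceQueries; infer_instance

-- ===== CLAIM (what is proved, stated in full; the proofs are below) =====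
def Claim_equal_pathExistenceQueries : Prop := ∀ (n : Int) (nums : List Int) (maxDiff : Int) (queries : List (List Int)), Dom_pathExistenceQueries n nums maxDiff queries → Pre_pathExistenceQueries n nums maxDiff queries → Spec_pathExistenceQueries n nums maxDiff queries (pathExistenceQueries n nums maxDiff queries)

-- ===== LEMMAS AND PROOFS =====

-- the break predicate both programs test (A at loop index i-1, B's union fires iff it is false)
def pvP (nums : List Int) (maxDiff : Int) (i : Int) : Bool :=
  decide (PySem.List.pyGetD nums i 0 - PySem.List.pyGetD nums (i - 1) 0 > maxDiff)

-- number of breaks among positions 1..j  (A's group id of node j)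
def pvCnt (nums : List Int) (maxDiff : Int) (j : Nat) : Int :=
  (((List.range j).filter (fun (k : Nat) => pvP nums maxDiff (1 + (k : Int)))).length : Int)

-- leftmost node of j's component (B's union-find root of node j)
def pvLeft (nums : List Int) (maxDiff : Int) : Nat → Int
  | 0 => 0
  | j + 1 => if pvP nums maxDiff ((j : Int) + 1) then (j : Int) + 1 else pvLeft nums maxDiff j

lemma pvCnt_zero (nums : List Int) (maxDiff : Int) : pvCnt nums maxDiff 0 = 0 := by
  simp [pvCnt]

lemma pvCnt_succ (nums : List Int) (maxDiff : Int) (m : Nat) :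
    pvCnt nums maxDiff (m + 1)
      = pvCnt nums maxDiff m + if pvP nums maxDiff ((m : Int) + 1) then 1 else 0 := by
  simp only [pvCnt, List.range_succ, List.filter_append, List.length_append,
    List.filter_cons, List.filter_nil]
  rw [show (1 + (m : Int)) = (m : Int) + 1 by ring]
  split <;> simp

lemma pvCnt_mono (nums : List Int) (maxDiff : Int) {j k : Nat} (h : j ≤ k) :
    pvCnt nums maxDiff j ≤ pvCnt nums maxDiff k := by
  induction k with
  | zero => rw [Nat.le_zero.mp h]
  | succ k ih =>
    rcases Nat.lt_or_ge j (k + 1) with hlt | hge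
    · calc pvCnt nums maxDiff j ≤ pvCnt nums maxDiff k := ih (by omega)
        _ ≤ pvCnt nums maxDiff (k + 1) := by rw [pvCnt_succ]; split <;> omega
    · rw [Nat.le_antisymm h hge]

lemma pvLeft_bounds (nums : List Int) (maxDiff : Int) (j : Nat) :
    0 ≤ pvLeft nums maxDiff j ∧ pvLeft nums maxDiff j ≤ (j : Int) := by
  induction j with
  | zero => simp [pvLeft]
  | succ j ih =>
    simp only [pvLeft]
    split
    · omega
    · push_cast; omega

-- the root is its own parent: pvLeft of a root is itself
lemma pvLeft_root (nums : List Int) (maxDiff : Int) (j : Nat) :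
    pvLeft nums maxDiff ((pvLeft nums maxDiff j).toNat) = pvLeft nums maxDiff j := by
  induction j with
  | zero => simp [pvLeft]
  | succ j ih =>
    simp only [pvLeft]
    by_cases hb : pvP nums maxDiff ((j : Int) + 1) = true
    · rw [if_pos hb, show (((j : Int) + 1).toNat) = j + 1 by omega]
      simp only [pvLeft]
      rw [if_pos hb]
    · rw [if_neg hb]
      exact ih

-- the bridge: same group id ↔ same root
lemma pvBridge_le (nums : List Int) (maxDiff : Int) :
    ∀ (k j : Nat), j ≤ k →
      (pvCnt nums maxDiff j = pvCnt nums maxDiff k ↔ pvLeft nums maxDiff j = pvLeft nums maxDiff k) := by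
  intro k
  induction k with
  | zero => intro j h; rw [Nat.le_zero.mp h]; simp
  | succ k ih =>
    intro j h
    rcases Nat.lt_or_ge j (k + 1) with hlt | hge
    · have hjk : j ≤ k := by omega
      rw [pvCnt_succ]
      simp only [pvLeft]
      by_cases hb : pvP nums maxDiff ((k : Int) + 1) = true
      · rw [if_pos hb, if_pos hb]
        have h1 : pvCnt nums maxDiff j ≤ pvCnt nums maxDiff k := pvCnt_mono nums maxDiff hjk
        have h2 := (pvLeft_bounds nums maxDiff j).2
        constructor
        · intro hc; omega
        · intro hc; exfalso; have : (j : Int) ≤ (k : Int) := by exact_mod_cast hjk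
          omega
      · rw [if_neg hb, if_neg hb]
        simpa using ih j hjk
    · rw [Nat.le_antisymm h hge]; simp

lemma pvBridge (nums : List Int) (maxDiff : Int) (j k : Nat) :
    (pvCnt nums maxDiff j = pvCnt nums maxDiff k ↔ pvLeft nums maxDiff j = pvLeft nums maxDiff k) := by
  rcases Nat.le_total j k with h | h
  · exact pvBridge_le nums maxDiff k j h
  · constructor
    · intro hc; exact (pvBridge_le nums maxDiff j k h).mp hc.symm |>.symm
    · intro hc; exact ((pvBridge_le nums maxDiff j k h).mpr hc.symm).symm

-- ---------- A's loop ----------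

-- A's loop state after the first m iterations
lemma pvLoopA (nums : List Int) (maxDiff : Int) (N : Nat) (m : Nat) :
    (PySem.List.pyRange 0 (m : Int) 1).foldl (pvStepA nums maxDiff) (List.replicate N 0, 0)
      = ((List.range N).map (fun j => if j ≤ m then pvCnt nums maxDiff j else 0),
         pvCnt nums maxDiff m) := by
  induction m with
  | zero =>
    rw [PySem.List.pyRange_one_eq_nil (by norm_num)]
    simp only [List.foldl_nil, Prod.mk.injEq]
    refine ⟨?_, (pvCnt_zero nums maxDiff).symm⟩
    apply List.ext_getElem
    · simp
    · intro j h1 h2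
      simp only [List.getElem_replicate, List.getElem_map, List.getElem_range]
      split
      · rename_i h
        rw [Nat.le_zero.mp h, pvCnt_zero]
      · rfl
  | succ m ih =>
    have hc : ((m + 1 : Nat) : Int) = (m : Int) + 1 := by push_cast; ring
    rw [hc, PySem.List.pyRange_one_succ_right (by positivity), List.foldl_append, ih]
    simp only [List.foldl_cons, List.foldl_nil, pvStepA]
    have hcond : (PySem.List.pyGetD nums ((m : Int) + 1) 0 - PySem.List.pyGetD nums (m : Int) 0 > maxDiff)
        ↔ pvP nums maxDiff ((m : Int) + 1) = true := by
      simp [pvP]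
    have hcur : (if PySem.List.pyGetD nums ((m : Int) + 1) 0 - PySem.List.pyGetD nums (m : Int) 0 > maxDiff
        then pvCnt nums maxDiff m + 1 else pvCnt nums maxDiff m) = pvCnt nums maxDiff (m + 1) := by
      rw [pvCnt_succ]
      by_cases hb : pvP nums maxDiff ((m : Int) + 1) = true
      · rw [if_pos (hcond.mpr hb), if_pos hb]
      · rw [if_neg (fun hx => hb (hcond.mp hx)), if_neg hb]
        ring
    simp only [hcur, Prod.mk.injEq]
    refine ⟨?_, trivial⟩
    rw [show (m : Int) + 1 = ((m + 1 : Nat) : Int) by push_cast; ring, PySem.List.pySetD_natCast]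
    apply List.ext_getElem
    · simp
    · intro j h1 h2
      simp only [List.length_map, List.length_range] at h1 h2
      rw [List.getElem_set]
      simp only [List.getElem_map, List.getElem_range]
      by_cases hj : m + 1 = j
      · subst hj; simp
      · rw [if_neg hj]
        by_cases hle : j ≤ m
        · rw [if_pos hle, if_pos (by omega)]
        · rw [if_neg hle, if_neg (by omega)]

-- A's final group array is exactly [pvCnt 0, …, pvCnt (n.toNat-1)]
lemma pvGroupA (n : Int) (nums : List Int) (maxDiff : Int) :
    ((PySem.List.pyRange 0 (n - 1) 1).foldl (pvStepA nums maxDiff) (List.replicate n.toNat 0, 0)).1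
      = (List.range n.toNat).map (fun j => pvCnt nums maxDiff j) := by
  by_cases hn : 1 ≤ n
  · rw [show n - 1 = (((n - 1).toNat : Nat) : Int) by omega, pvLoopA]
    apply List.map_congr_left
    intro j hj
    rw [if_pos (by have := List.mem_range.mp hj; omega)]
  · rw [PySem.List.pyRange_one_eq_nil (by omega)]
    simp [show n.toNat = 0 by omega]

-- ---------- B's loop ----------

-- B's parent array after the first m iterations, as an abbreviation
def pvParent (nums : List Int) (maxDiff : Int) (N m : Nat) : List Int :=
  (List.range N).map (fun j => if j ≤ m then pvLeft nums maxDiff j else (j : Int))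

lemma pvParent_length (nums : List Int) (maxDiff : Int) (N m : Nat) :
    (pvParent nums maxDiff N m).length = N := by simp [pvParent]

lemma pvParent_get (nums : List Int) (maxDiff : Int) (N m j : Nat) (hj : j < N) :
    PySem.List.pyGetD (pvParent nums maxDiff N m) (j : Int) 0
      = (if j ≤ m then pvLeft nums maxDiff j else (j : Int)) := by
  rw [PySem.List.pyGetD_natCast, pvParent, List.getD_eq_getElem _ _ (by simpa using hj)]
  simp

-- find from a node that is already a root returns it, with any fuel
lemma pvFindRoot (nums : List Int) (maxDiff : Int) (N m : Nat) (r : Int) (fuel : Nat)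
    (hr0 : 0 ≤ r) (hrN : r.toNat < N) (hrm : r.toNat ≤ m)
    (hroot : pvLeft nums maxDiff r.toNat = r) :
    pvFind fuel (pvParent nums maxDiff N m) r = r := by
  cases fuel with
  | zero => rfl
  | succ f =>
    simp only [pvFind]
    have hget : PySem.List.pyGetD (pvParent nums maxDiff N m) r 0 = r := by
      rw [show r = ((r.toNat : Nat) : Int) by omega,
        pvParent_get nums maxDiff N m r.toNat hrN, if_pos hrm]
      omega
    rw [hget, if_pos rfl]

-- find on the partial parent forest, from a processed node: reaches the root in ≤ 2 hops
lemma pvFindProcessed (nums : List Int) (maxDiff : Int) (N m j : Nat) (fuel : Nat)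
    (hj : j < N) (hjm : j ≤ m) (hfuel : 2 ≤ fuel) :
    pvFind fuel (pvParent nums maxDiff N m) (j : Int) = pvLeft nums maxDiff j := by
  obtain ⟨f, rfl⟩ : ∃ f, fuel = f + 1 := ⟨fuel - 1, by omega⟩
  simp only [pvFind]
  rw [pvParent_get nums maxDiff N m j hj, if_pos hjm]
  by_cases hroot : pvLeft nums maxDiff j = (j : Int)
  · rw [if_pos hroot, hroot]
  · rw [if_neg hroot]
    have hb := pvLeft_bounds nums maxDiff j
    exact pvFindRoot nums maxDiff N m _ f hb.1 (by omega) (by omega)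
      (pvLeft_root nums maxDiff j)

-- find from an untouched node is the node itself
lemma pvFindFresh (nums : List Int) (maxDiff : Int) (N m j : Nat) (fuel : Nat)
    (hj : j < N) (hjm : m < j) (hfuel : 1 ≤ fuel) :
    pvFind fuel (pvParent nums maxDiff N m) (j : Int) = (j : Int) := by
  obtain ⟨f, rfl⟩ : ∃ f, fuel = f + 1 := ⟨fuel - 1, by omega⟩
  simp only [pvFind]
  rw [pvParent_get nums maxDiff N m j hj]
  have h1 : ¬ j ≤ m := by omega
  rw [if_neg h1, if_pos rfl]

-- the loop invariant: after m iterations the parent array is pvParent … m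
lemma pvLoopB (nums : List Int) (maxDiff : Int) (N : Nat) (m : Nat)
    (hm : m < N ∨ m = 0) :
    (PySem.List.pyRange 0 (m : Int) 1).foldl (pvStepB nums maxDiff) (PySem.List.pyRange 0 (N : Int) 1)
      = pvParent nums maxDiff N m := by
  have hinit : PySem.List.pyRange 0 (N : Int) 1 = pvParent nums maxDiff N 0 := by
    rw [PySem.List.pyRange_zero_natCast, pvParent]
    apply List.map_congr_left
    intro j hj
    split
    · rename_i h; rw [Nat.le_zero.mp h]; simp [pvLeft]
    · rfl
  induction m with
  | zero =>
    rw [show ((0 : Nat) : Int) = 0 from rfl, PySem.List.pyRange_one_eq_nil (le_refl (0 : Int)),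
      List.foldl_nil, hinit]
  | succ m ih =>
    have hmN : m + 1 < N := by omega
    have hc : ((m + 1 : Nat) : Int) = (m : Int) + 1 := by push_cast; ring
    rw [hc, PySem.List.pyRange_one_succ_right (by positivity), List.foldl_append,
      ih (by omega)]
    simp only [List.foldl_cons, List.foldl_nil, pvStepB]
    have e1 : (m : Int) + 1 - 1 = (m : Int) := by ring
    have hlen := pvParent_length nums maxDiff N m
    have hfind1 : pvFind ((pvParent nums maxDiff N m).length + 1)
        (pvParent nums maxDiff N m) ((m : Int) + 1) = (m : Int) + 1 := by
      rw [show (m : Int) + 1 = ((m + 1 : Nat) : Int) by push_cast; ring]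
      exact pvFindFresh nums maxDiff N m (m + 1) _ hmN (by omega) (by omega)
    have hfind0 : pvFind ((pvParent nums maxDiff N m).length + 1)
        (pvParent nums maxDiff N m) ((m : Int)) = pvLeft nums maxDiff m :=
      pvFindProcessed nums maxDiff N m m _ (by omega) le_rfl (by omega)
    by_cases hb : pvP nums maxDiff ((m : Int) + 1) = true
    · -- break: no union; node m+1 stays its own parent, pvLeft (m+1) = m+1
      simp only [pvP, decide_eq_true_eq, e1] at hb
      rw [if_neg (by omega)]
      apply List.ext_getElem
      · simp [pvParent]
      · intro j h1 h2
        simp only [pvParent, List.getElem_map, List.getElem_range]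
        by_cases hj : j ≤ m
        · rw [if_pos hj, if_pos (by omega)]
        · rw [if_neg hj]
          by_cases hj1 : j ≤ m + 1
          · have hjeq : j = m + 1 := by omega
            subst hjeq
            rw [if_pos le_rfl]
            simp only [pvLeft]
            rw [if_pos (by simp only [pvP, decide_eq_true_eq, e1]; omega)]
            push_cast
            ring
          · rw [if_neg hj1]
    · -- no break: union(m, m+1): parent[m+1] := pvLeft m = pvLeft (m+1)
      have hb' : ¬ (PySem.List.pyGetD nums ((m : Int) + 1) 0 - PySem.List.pyGetD nums ((m : Int)) 0 > maxDiff) := by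
        simp only [pvP, decide_eq_true_eq, e1] at hb
        exact hb
      rw [if_pos (by omega)]
      rw [hfind0, hfind1]
      rw [show (m : Int) + 1 = ((m + 1 : Nat) : Int) by push_cast; ring, PySem.List.pySetD_natCast]
      apply List.ext_getElem
      · simp [pvParent]
      · intro j h1 h2
        rw [List.getElem_set]
        simp only [pvParent, List.getElem_map, List.getElem_range,
          List.length_map, List.length_range] at h1 h2 ⊢
        by_cases hj : m + 1 = j
        · subst hj
          rw [if_pos rfl, if_pos le_rfl]
          simp only [pvLeft]
          rw [if_neg (by simp only [pvP, decide_eq_true_eq, e1]; omega)]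
        · rw [if_neg hj]
          by_cases hle : j ≤ m
          · rw [if_pos hle, if_pos (by omega)]
          · rw [if_neg hle, if_neg (by omega)]

-- B's final parent array
lemma pvParentFinal (n : Int) (nums : List Int) (maxDiff : Int) :
    (PySem.List.pyRange 0 (n - 1) 1).foldl (pvStepB nums maxDiff) (PySem.List.pyRange 0 n 1)
      = pvParent nums maxDiff n.toNat (n.toNat - 1) := by
  by_cases hn : 1 ≤ n
  · rw [show n = ((n.toNat : Nat) : Int) by omega,
      show (((n.toNat : Nat) : Int)) - 1 = (((n.toNat - 1 : Nat) : Nat) : Int) by omega]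
    exact pvLoopB nums maxDiff n.toNat (n.toNat - 1) (Or.inl (by omega))
  · rw [PySem.List.pyRange_one_eq_nil (by omega), PySem.List.pyRange_one_eq_nil (by omega),
      List.foldl_nil]
    simp [pvParent, show n.toNat = 0 by omega]

-- the index a Python read xs[u] with -N ≤ u < N actually touches
def pvIdx (N : Nat) (u : Int) : Nat := if u < 0 then (u + N).toNat else u.toNat

-- find on the final forest, any in-range (possibly negative) start
lemma pvFindFinal (nums : List Int) (maxDiff : Int) (N : Nat) (u : Int)
    (h0 : -(N : Int) ≤ u) (h1 : u < (N : Int)) :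
    pvFind (N + 1) (pvParent nums maxDiff N (N - 1)) u
      = pvLeft nums maxDiff (pvIdx N u) := by
  have hN : 1 ≤ N := by omega
  rcases Int.lt_or_le u 0 with hneg | hpos
  · -- negative start: first hop reads parent[N-k] (a root ≥ 0 ≠ u), then return from the root
    obtain ⟨k, rfl⟩ : ∃ k : Nat, u = -(k : Int) := ⟨(-u).toNat, by omega⟩
    have hk1 : 0 < k := by omega
    have hkN : k ≤ N := by omega
    obtain ⟨f, hf⟩ : ∃ f, N + 1 = f + 1 := ⟨N, rfl⟩
    rw [hf]
    simp only [pvFind]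
    have hget : PySem.List.pyGetD (pvParent nums maxDiff N (N - 1)) (-(k : Int)) 0
        = pvLeft nums maxDiff (N - k) := by
      rw [PySem.List.pyGetD_neg_natCast _ k 0 hk1 (by rw [pvParent_length]; omega)]
      simp only [pvParent, List.length_map, List.length_range, List.getElem_map,
        List.getElem_range]
      rw [if_pos (by omega)]
    rw [hget]
    have hroots := pvLeft_bounds nums maxDiff (N - k)
    rw [if_neg (by omega)]
    have hidx : pvIdx N (-(k : Int)) = N - k := by
      simp only [pvIdx, if_pos (show -(k : Int) < 0 by omega)]
      omega
    rw [hidx]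
    exact pvFindRoot nums maxDiff N (N - 1) _ f hroots.1 (by omega) (by omega)
      (pvLeft_root nums maxDiff (N - k))
  · have hidx : pvIdx N u = u.toNat := by
      simp only [pvIdx]
      rw [if_neg (by omega)]
    rw [hidx, show u = ((u.toNat : Nat) : Int) by omega]
    exact pvFindProcessed nums maxDiff N (N - 1) u.toNat _ (by omega) (by omega) (by omega)

-- A's table lookup at a possibly negative in-range index
lemma pvGroupGet (nums : List Int) (maxDiff : Int) (N : Nat) (u : Int)
    (h0 : -(N : Int) ≤ u) (h1 : u < (N : Int)) :
    PySem.List.pyGetD ((List.range N).map (fun j => pvCnt nums maxDiff j)) u 0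
      = pvCnt nums maxDiff (pvIdx N u) := by
  rcases Int.lt_or_le u 0 with hneg | hpos
  · obtain ⟨k, rfl⟩ : ∃ k : Nat, u = -(k : Int) := ⟨(-u).toNat, by omega⟩
    rw [PySem.List.pyGetD_neg_natCast _ k 0 (by omega) (by simp; omega)]
    simp only [List.length_map, List.length_range, List.getElem_map, List.getElem_range]
    congr 1
    simp only [pvIdx, if_pos (show -(k : Int) < 0 by omega)]
    omega
  · have hidx : pvIdx N u = u.toNat := by
      simp only [pvIdx]
      rw [if_neg (by omega)]
    rw [hidx, show u = ((u.toNat : Nat) : Int) by omega, PySem.List.pyGetD_natCast,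
      List.getD_eq_getElem _ _ (by simp; omega)]
    simp only [List.getElem_map, List.getElem_range, Int.toNat_natCast]

-- ===== VERDICT (by name: the statement is the Claim_ definition above) =====
theorem pathExistenceQueries_spec : Claim_equal_pathExistenceQueries := by
  intro n nums maxDiff queries hdom hpre
  unfold Spec_pathExistenceQueries
  unfold pathExistenceQueries pathExistenceQueries_alt
  simp only []
  rw [PySem.List.foldl_append_singleton_eq_map, List.nil_append, pvGroupA, pvParentFinal]
  apply List.map_congr_left
  intro q hq
  obtain ⟨hlen, hu0, hu1, hv0, hv1⟩ := hpre.2 q hq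
  have hu : PySem.List.pyGetD q 0 0 = q.getD 0 0 := by
    rw [show (0 : Int) = ((0 : Nat) : Int) by rfl, PySem.List.pyGetD_natCast]
  have hv : PySem.List.pyGetD q 1 0 = q.getD 1 0 := by
    rw [show (1 : Int) = ((1 : Nat) : Int) by rfl, PySem.List.pyGetD_natCast]
  have hNn : ((n.toNat : Nat) : Int) = n := by omega
  rw [hu, hv, pvParent_length]
  rw [pvGroupGet nums maxDiff n.toNat _ (by omega) (by omega),
      pvGroupGet nums maxDiff n.toNat _ (by omega) (by omega),
      pvFindFinal nums maxDiff n.toNat _ (by omega) (by omega),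
      pvFindFinal nums maxDiff n.toNat _ (by omega) (by omega)]
  exact decide_eq_decide.mpr (pvBridge nums maxDiff _ _)
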